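-- pv_equiv track=rewrite | github.com/adamrd231/caesar-cipher | helpers.py | index_list
-- ===== SOURCE A (Python) =====
-- def index_list(index, length_cipher):
--
--     index_list = []
--     #loop through a range as big as the cipher list
--     for i in range(length_cipher):
--         #create a new list with the index word
--         index_list += (index[i % (len(index))])
--         #convert the letters into ordinal numbers
--         index_list[i] = ord(index_list[i])
--         #account for capitals
--         cap = 97 if index_list[i] > 96 else 65
--         index_list[i] = index_list[i] - cap
--
--     return index_list
-- ===== SOURCE B (Python) =====
-- def index_list(index, length_cipher):
--     # Block repetition: the output is the letter-value table repeated whole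
--     # q times plus a prefix of r values, where q, r = divmod(length_cipher, len(index)).
--     if length_cipher <= 0:
--         return []
--     table = [ord(c) - (97 if ord(c) > 96 else 65) for c in index]
--     q, r = divmod(length_cipher, len(index))
--     return table * q + table[:r]
-- ===== Notes on version B (the rewrite author's own statement) =====
-- stated objective: alternative
-- what changed: B replaces A's per-position cyclic indexing (i % len(index) for every output element) by block repetition: it builds the letter-value table once and returns table * q + table[:r] with q, r = divmod(length_cipher, len(index)), one division total instead of one modulo per element.
import Mathlib
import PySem

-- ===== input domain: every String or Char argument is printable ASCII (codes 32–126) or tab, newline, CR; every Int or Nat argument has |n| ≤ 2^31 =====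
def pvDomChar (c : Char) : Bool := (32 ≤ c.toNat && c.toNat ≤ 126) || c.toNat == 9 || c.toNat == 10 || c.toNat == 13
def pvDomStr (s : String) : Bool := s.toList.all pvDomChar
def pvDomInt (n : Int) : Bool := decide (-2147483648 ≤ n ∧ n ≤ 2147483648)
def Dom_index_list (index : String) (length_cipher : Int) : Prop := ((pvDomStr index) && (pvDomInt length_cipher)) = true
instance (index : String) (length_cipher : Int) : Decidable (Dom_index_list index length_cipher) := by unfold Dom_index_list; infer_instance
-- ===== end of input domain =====

-- B builds the letter-value table once and returns it repeated q whole times plus an r-prefix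
-- (q, r = divmod(length_cipher, len(index))), instead of A's per-position cyclic indexing.

-- ===== PORT A =====
-- Literal transliteration of A's loop.  The Python appends the one-char string and
-- then overwrites slot i with its ord; a Lean `List Int` cannot hold the char, so
-- the append and the ord conversion are fused into one step (same value at slot i).
def index_list (index : String) (length_cipher : Int) : List Int :=
  (PySem.List.pyRange 0 length_cipher 1).foldl (fun acc i =>
    -- index_list += index[i % len(index)];  index_list[i] = ord(index_list[i])
    let c : Char := (PySem.List.pyGet? index.toList (PySem.Int.mod i (index.toList.length : Int))).getD ' '
    let acc1 := acc ++ [(c.toNat : Int)]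
    -- cap = 97 if index_list[i] > 96 else 65
    let v : Int := (PySem.List.pyGet? acc1 i).getD 0
    let cap : Int := if v > 96 then 97 else 65
    -- index_list[i] = index_list[i] - cap
    acc1.set i.toNat (v - cap)) []

-- ===== PORT B =====
def index_list_alt (index : String) (length_cipher : Int) : List Int :=
  if length_cipher ≤ 0 then []
  else
    -- table = [ord(c) - (97 if ord(c) > 96 else 65) for c in index]
    let table : List Int :=
      index.toList.map (fun c => (c.toNat : Int) - (if (c.toNat : Int) > 96 then 97 else 65))
    -- q, r = divmod(length_cipher, len(index))
    let q : Int := PySem.Int.floordiv length_cipher (index.toList.length : Int)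
    let r : Int := PySem.Int.mod length_cipher (index.toList.length : Int)
    -- table * q + table[:r]   (list repetition; q ≥ 0 here so .toNat is exact)
    (List.replicate q.toNat table).flatten ++ PySem.List.slice table none (some r)

-- ===== PRECONDITION & SPEC =====
-- Pre_ excludes only the inputs where Python A raises ZeroDivisionError
-- (empty index with length_cipher > 0); B raises there too.
def Pre_index_list (index : String) (length_cipher : Int) : Prop :=
  index.toList ≠ [] ∨ length_cipher ≤ 0
instance (index : String) (length_cipher : Int) : Decidable (Pre_index_list index length_cipher) := by
  unfold Pre_index_list; infer_instance

def pvWitness_index_list : String × Int := ("aZ", 5)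

def Spec_index_list (index : String) (length_cipher : Int) (out : List Int) : Prop :=
  out = index_list_alt index length_cipher
instance (index : String) (length_cipher : Int) (out : List Int) : Decidable (Spec_index_list index length_cipher out) := by
  unfold Spec_index_list; infer_instance

-- ===== CLAIM =====
def Claim_equal_index_list : Prop := ∀ (index : String) (length_cipher : Int), Dom_index_list index length_cipher → Pre_index_list index length_cipher → Spec_index_list index length_cipher (index_list index length_cipher)

-- ===== LEMMAS AND PROOFS =====

-- the per-position value A computes: ord of the cycled letter minus its cap
def pvVal (cs : List Char) (i : Int) : Int :=
  let c : Char := (PySem.List.pyGet? cs (PySem.Int.mod i (cs.length : Int))).getD ' '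
  (c.toNat : Int) - (if (c.toNat : Int) > 96 then 97 else 65)

lemma set_append_singleton (acc : List Int) (x y : Int) :
    (acc ++ [x]).set acc.length y = acc ++ [y] := by
  induction acc with
  | nil => rfl
  | cons a t ih => simp [ih]

lemma stepA_eq (cs : List Char) (acc : List Int) (i : Int)
    (hi : (acc.length : Int) = i) :
    (let c : Char := (PySem.List.pyGet? cs (PySem.Int.mod i (cs.length : Int))).getD ' '
     let acc1 := acc ++ [(c.toNat : Int)]
     let v : Int := (PySem.List.pyGet? acc1 i).getD 0
     let cap : Int := if v > 96 then 97 else 65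
     acc1.set i.toNat (v - cap)) = acc ++ [pvVal cs i] := by
  subst hi
  simp only [pvVal, PySem.List.pyGet?_append_length]
  have : ((acc.length : Int)).toNat = acc.length := by omega
  rw [this, set_append_singleton]
  rfl

lemma foldA_eq (cs : List Char) :
    ∀ (m : Nat) (a : Int) (acc : List Int), 0 ≤ a → (acc.length : Int) = a →
    (PySem.List.pyRange a (a + m) 1).foldl (fun acc i =>
      let c : Char := (PySem.List.pyGet? cs (PySem.Int.mod i (cs.length : Int))).getD ' '
      let acc1 := acc ++ [(c.toNat : Int)]
      let v : Int := (PySem.List.pyGet? acc1 i).getD 0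
      let cap : Int := if v > 96 then 97 else 65
      acc1.set i.toNat (v - cap)) acc
    = acc ++ (PySem.List.pyRange a (a + m) 1).map (pvVal cs) := by
  intro m
  induction m with
  | zero =>
    intro a acc _ _
    have h : PySem.List.pyRange a (a + ((0:Nat):Int)) 1 = [] :=
      PySem.List.pyRange_one_eq_nil (by omega)
    rw [h]; simp
  | succ k ih =>
    intro a acc ha hlen
    rw [PySem.List.pyRange_one_cons (by omega : a < a + ((k:Nat)+1:Nat))]
    simp only [List.foldl_cons, List.map_cons]
    rw [stepA_eq cs acc a hlen]
    have h1 : a + ((k + 1 : Nat) : Int) = (a + 1) + (k : Nat) := by push_cast; ring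
    have h2 : (PySem.List.pyRange (a+1) (a + ((k+1:Nat):Int)) 1) = PySem.List.pyRange (a+1) ((a+1) + (k:Nat)) 1 := by rw [h1]
    rw [h2, ih (a+1) (acc ++ [pvVal cs a]) (by omega) (by simp; omega)]
    simp

-- pvVal at a Nat index is the table entry at j % n
lemma pvVal_nat (cs : List Char) (hne : cs ≠ []) (j : Nat) :
    pvVal cs (j : Int)
      = (cs.map (fun c => (c.toNat : Int) - (if (c.toNat : Int) > 96 then 97 else 65))).getD
          (j % cs.length) 0 := by
  have hn : 0 < cs.length := List.length_pos_of_ne_nil hne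
  have hk : j % cs.length < cs.length := Nat.mod_lt _ hn
  rw [pvVal, PySem.Int.mod_natCast, PySem.List.pyGet?_natCast]
  rw [List.getD_eq_getElem _ _ (by simpa using hk)]
  rw [List.getElem?_eq_getElem hk]
  simp

-- a prefix of the table, read entry by entry
lemma map_range_getD_take (t : List Int) (r : Nat) (hr : r ≤ t.length) :
    (List.range r).map (fun j => t.getD j 0) = t.take r := by
  apply List.ext_getElem
  · simp [hr]
  · intro i h1 h2
    have hi : i < r := by simpa using h1
    have hit : i < t.length := lt_of_lt_of_le hi hr
    simp [hit]

-- the cyclic read of q whole blocks plus an r-prefix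
lemma cycle_eq (t : List Int) :
    ∀ (q r : Nat), r ≤ t.length →
    (List.range (q * t.length + r)).map (fun j => t.getD (j % t.length) 0)
      = (List.replicate q t).flatten ++ t.take r := by
  intro q
  induction q with
  | zero =>
    intro r hr
    simp only [Nat.zero_mul, Nat.zero_add, List.replicate_zero, List.flatten_nil, List.nil_append]
    have : ∀ j ∈ List.range r, t.getD (j % t.length) 0 = t.getD j 0 := by
      intro j hj
      have : j < t.length := lt_of_lt_of_le (List.mem_range.mp hj) hr
      rw [Nat.mod_eq_of_lt this]
    rw [List.map_congr_left this, map_range_getD_take t r hr]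
  | succ k ih =>
    intro r hr
    have hsplit : (k + 1) * t.length + r = t.length + (k * t.length + r) := by ring
    rw [hsplit, List.range_add, List.map_append, List.map_map]
    have h1 : (List.range t.length).map (fun j => t.getD (j % t.length) 0) = t := by
      have hc : ∀ j ∈ List.range t.length, t.getD (j % t.length) 0 = t.getD j 0 := by
        intro j hj
        rw [Nat.mod_eq_of_lt (List.mem_range.mp hj)]
      rw [List.map_congr_left hc, map_range_getD_take t t.length le_rfl, List.take_length]
    have h2 : ((List.range (k * t.length + r)).map
        ((fun j => t.getD (j % t.length) 0) ∘ fun i => t.length + i))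
        = (List.replicate k t).flatten ++ t.take r := by
      rw [← ih r hr]
      apply List.map_congr_left
      intro j _
      simp [Function.comp, Nat.add_mod_left]
    rw [h1, h2, List.replicate_succ, List.flatten_cons, List.append_assoc]

-- ===== VERDICT =====
theorem index_list_spec : Claim_equal_index_list := by
  intro index length_cipher _ hpre
  unfold Spec_index_list index_list index_list_alt
  rcases le_or_gt length_cipher 0 with hle | hgt
  · simp [PySem.List.pyRange_one_eq_nil hle, hle]
  · rcases hpre with hne | hle
    · rw [if_neg (by omega)]
      set cs := index.toList with hcs
      set t : List Int := cs.map (fun c => (c.toNat : Int) - (if (c.toNat : Int) > 96 then 97 else 65)) with ht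
      have hn : 0 < cs.length := List.length_pos_of_ne_nil hne
      have htne : t ≠ [] := by
        intro h; apply hne; simpa [ht] using congrArg List.length h
      have htlen : t.length = cs.length := by simp [ht]
      -- replace length_cipher by its Nat cast throughout
      set N := length_cipher.toNat with hN
      have hLc : length_cipher = ((N : Nat) : Int) := by omega
      rw [hLc]
      -- A side: the fold is the map of pvVal over the range
      rw [show PySem.List.pyRange 0 ((N : Nat) : Int) 1
            = PySem.List.pyRange 0 (0 + ((N : Nat) : Int)) 1 by norm_num]
      rw [foldA_eq cs N 0 [] le_rfl (by simp)]
      simp only [List.nil_append]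
      rw [PySem.List.pyRange_one, List.map_map]
      have hb : ((0:Int) + (N : Int) - 0).toNat = N := by omega
      rw [hb]
      -- B side: floordiv/mod at nonnegative arguments are Nat div/mod
      rw [PySem.Int.floordiv_natCast, PySem.Int.mod_natCast]
      rw [PySem.List.slice_to_natCast]
      simp only [Int.toNat_natCast]
      have hdm : N / cs.length * t.length + N % cs.length = N := by
        rw [htlen]; exact Nat.div_add_mod' N cs.length
      have hmain : (List.range N).map (fun j => t.getD (j % t.length) 0)
          = (List.replicate (N / cs.length) t).flatten ++ t.take (N % cs.length) := by
        have h := cycle_eq t (N / cs.length) (N % cs.length)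
          (by rw [htlen]; exact le_of_lt (Nat.mod_lt _ hn))
        rwa [hdm] at h
      rw [← hmain]
      apply List.map_congr_left
      intro j _
      simp only [Function.comp_apply, zero_add]
      rw [pvVal_nat cs hne j, htlen]
    · omega
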